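-- pv_equiv track=rewrite | github.com/shuckerino/Uni | Bioinformatics/Chapter07/Lab07/alignment_game_brute_force.py | brute_force_alignment
-- ===== SOURCE A (Python) =====
-- def score_alignment(seq1, seq2):
--     score = 0
--     for s1, s2 in zip(seq1, seq2):
--         if s1 == s2:
--             score += 1  # Match
--         elif s1 == '-' or s2 == '-':
--             score -= 1  # Gap
--         else:
--             score -= 1  # Mismatch
--     return score
--
-- def brute_force_alignment(seq1, seq2):
--     best_score = -float('inf')
--     best_alignment = ("", "")
--     # Schleifen durch alle möglichen Positionen für die Ausrichtung
--     for i in range(-len(seq2) + 1, len(seq1)):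
--         # Berechnung der Verschiebung
--         seq1_shifted = seq1[max(0, i):]  # S1 angepasst
--         seq2_shifted = seq2[max(0, -i):]  # S2 angepasst
--
--         # Auffüllen mit Lücken, wenn nötig
--         seq1_aligned = seq1_shifted.ljust(len(seq2_shifted), '-')
--         seq2_aligned = seq2_shifted.ljust(len(seq1_shifted), '-')
--         # Berechnen der Punktzahl für das Alignment
--         score = score_alignment(seq1_aligned, seq2_aligned)
--         # Aktualisieren des besten Alignments
--         if score > best_score:
--             best_score = score
--             best_alignment = (seq1_aligned, seq2_aligned)
--     return best_alignment
-- ===== SOURCE B (Python) =====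
-- def brute_force_alignment(seq1, seq2):
--     n1, n2 = len(seq1), len(seq2)
--     # index: positions of each character of seq2
--     pos2 = {}
--     for q, c in enumerate(seq2):
--         pos2[c] = pos2.get(c, []) + [q]
--     # cross-correlation by matching pairs: one increment per equal character pair,
--     # bucketed by shift p - q (replaces the per-shift rescan of A)
--     cnt = {}
--     for p, c in enumerate(seq1):
--         for q in pos2.get(c, []):
--             k = p - q
--             cnt[k] = cnt.get(k, 0) + 1
--     # d1[j] = number of '-' among the last j characters of seq1 (pad chars match a literal '-')
--     t = 0
--     d1 = [0]
--     for ch in reversed(seq1):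
--         t = t + (1 if ch == '-' else 0)
--         d1.append(t)
--     t = 0
--     d2 = [0]
--     for ch in reversed(seq2):
--         t = t + (1 if ch == '-' else 0)
--         d2.append(t)
--     # scan all shifts with O(1) work each; first maximum wins, as in A
--     best = None  # (score, shift)
--     for i in range(-n2 + 1, n1):
--         la = n1 - max(0, i)
--         lb = n2 - max(0, -i)
--         m = cnt.get(i, 0)
--         if la > lb:
--             m = m + d1[la - lb]
--         elif lb > la:
--             m = m + d2[lb - la]
--         score = 2 * m - max(la, lb)
--         if best is None or score > best[0]:
--             best = (score, i)
--     if best is None: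
--         return ("", "")
--     i = best[1]
--     a = seq1[max(0, i):]
--     b = seq2[max(0, -i):]
--     L = max(len(a), len(b))
--     return (a + '-' * (L - len(a)), b + '-' * (L - len(b)))
-- ===== Notes on version B (the rewrite author's own statement) =====
-- stated objective: faster
-- what changed: Instead of rebuilding and rescoring a padded alignment for every shift (O(n) work per shift), B buckets every equal character pair of seq1/seq2 by its shift p-q in one counting pass over an index of seq2's character positions, precomputes suffix counts of '-' for the overhang padding, and then scores each shift in O(1) before reconstructing only the winning alignment.
import Mathlib
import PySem

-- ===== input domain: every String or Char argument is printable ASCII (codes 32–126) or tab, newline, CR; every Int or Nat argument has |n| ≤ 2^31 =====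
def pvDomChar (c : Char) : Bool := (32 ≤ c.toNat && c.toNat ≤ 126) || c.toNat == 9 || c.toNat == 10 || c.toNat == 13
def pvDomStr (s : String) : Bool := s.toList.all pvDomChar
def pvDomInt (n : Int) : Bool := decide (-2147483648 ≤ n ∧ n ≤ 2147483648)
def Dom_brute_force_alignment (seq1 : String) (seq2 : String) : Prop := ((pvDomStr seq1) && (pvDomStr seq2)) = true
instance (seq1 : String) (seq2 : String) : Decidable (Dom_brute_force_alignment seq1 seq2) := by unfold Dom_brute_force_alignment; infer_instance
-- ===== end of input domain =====

-- B replaces A's per-shift rebuild-and-rescore of the padded alignment by one pair-counting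
-- pass bucketed by shift plus suffix '-' tables, scoring each shift in O(1) (objective: faster).


-- ===== PORT A =====
-- score_alignment: zip loop with the three branches of A kept in order
def pvScoreAlign (a : List Char) (b : List Char) : Int :=
  (a.zip b).foldl (fun score p =>
    if p.1 = p.2 then score + 1
    else if p.1 = '-' ∨ p.2 = '-' then score - 1
    else score - 1) 0

-- s.ljust(w, '-')
def pvLjust (s : List Char) (w : Int) : List Char :=
  s ++ List.replicate (w.toNat - s.length) '-'

-- best_score = -inf is modelled as `none` (any int > -inf, exactly the first-iteration behaviour)
def brute_force_alignment (seq1 : String) (seq2 : String) : List String :=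
  let l1 := seq1.toList
  let l2 := seq2.toList
  let n1 : Int := PySem.List.len l1
  let n2 : Int := PySem.List.len l2
  let st := (PySem.List.pyRange (-n2 + 1) n1 1).foldl
    (fun (st : Option Int × (List Char × List Char)) i =>
      let s1s := PySem.List.slice l1 (some (max 0 i)) none
      let s2s := PySem.List.slice l2 (some (max 0 (-i))) none
      let aAl := pvLjust s1s (PySem.List.len s2s)
      let bAl := pvLjust s2s (PySem.List.len s1s)
      let score := pvScoreAlign aAl bAl
      match st.1 with
      | none => (some score, (aAl, bAl))
      | some best => if best < score then (some score, (aAl, bAl)) else st)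
    (none, ([], []))
  [String.ofList st.2.1, String.ofList st.2.2]

-- ===== PORT B =====
-- pos2[c] = pos2.get(c, []) + [q]  (an in-place overwrite = Dict.modify)
def pvPos2 (l2 : List Char) : PySem.Dict Char (List Int) :=
  (PySem.List.enumerate l2 0).foldl (fun d qc => d.modify qc.2 [] (· ++ [qc.1])) PySem.Dict.empty

-- cnt[p-q] = cnt.get(p-q, 0) + 1, one increment per equal character pair
def pvCnt (l1 : List Char) (pos2 : PySem.Dict Char (List Int)) : PySem.Dict Int Int :=
  (PySem.List.enumerate l1 0).foldl
    (fun d pc => (pos2.getD pc.2 []).foldl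
      (fun d q => d.insert (pc.1 - q) (d.getD (pc.1 - q) 0 + 1)) d)
    PySem.Dict.empty

-- d[j] = number of '-' among the last j characters (running total t, appended per char of reversed s)
def pvDashTable (l : List Char) : Int × List Int :=
  l.reverse.foldl
    (fun s ch => let t := s.1 + (if ch = '-' then (1 : Int) else 0); (t, s.2 ++ [t]))
    (0, [0])

def brute_force_alignment_alt (seq1 : String) (seq2 : String) : List String :=
  let l1 := seq1.toList
  let l2 := seq2.toList
  let n1 : Int := PySem.List.len l1
  let n2 : Int := PySem.List.len l2
  let pos2 := pvPos2 l2
  let cnt := pvCnt l1 pos2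
  let d1 := pvDashTable l1
  let d2 := pvDashTable l2
  let best := (PySem.List.pyRange (-n2 + 1) n1 1).foldl
    (fun (best : Option (Int × Int)) i =>
      let la := n1 - max 0 i
      let lb := n2 - max 0 (-i)
      let m0 := cnt.getD i 0
      -- the table indices la-lb / lb-la are provably in range here, so pyGetD is exact
      let m := if la > lb then m0 + PySem.List.pyGetD d1.2 (la - lb) 0
               else if lb > la then m0 + PySem.List.pyGetD d2.2 (lb - la) 0
               else m0
      let score := 2 * m - max la lb
      match best with
      | none => some (score, i)
      | some b => if b.1 < score then some (score, i) else best)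
    none
  match best with
  | none => [String.ofList [], String.ofList []]
  | some b =>
    let i := b.2
    let a := PySem.List.slice l1 (some (max 0 i)) none
    let bb := PySem.List.slice l2 (some (max 0 (-i))) none
    let L := max (PySem.List.len a) (PySem.List.len bb)
    [String.ofList (a ++ List.replicate (L - PySem.List.len a).toNat '-'),
     String.ofList (bb ++ List.replicate (L - PySem.List.len bb).toNat '-')]

-- ===== PRECONDITION & SPEC =====
def Spec_brute_force_alignment (seq1 : String) (seq2 : String) (out : List String) : Prop := out = brute_force_alignment_alt seq1 seq2
instance (seq1 : String) (seq2 : String) (out : List String) : Decidable (Spec_brute_force_alignment seq1 seq2 out) := by unfold Spec_brute_force_alignment; infer_instance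

-- ===== CLAIM (what is proved, stated in full; the proofs are below) =====
def Claim_equal_brute_force_alignment : Prop := ∀ (seq1 : String) (seq2 : String), Dom_brute_force_alignment seq1 seq2 → Spec_brute_force_alignment seq1 seq2 (brute_force_alignment seq1 seq2)

-- ===== LEMMAS AND PROOFS =====

-- offsets and slices of the two sequences at shift i (proof-only abbreviations)
def pvOff1 (i : Int) : Nat := (max 0 i).toNat
def pvOff2 (i : Int) : Nat := (max 0 (-i)).toNat
def pvA (l1 : List Char) (i : Int) : List Char := l1.drop (pvOff1 i)
def pvBB (l2 : List Char) (i : Int) : List Char := l2.drop (pvOff2 i)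
def pvAlignedA (l1 l2 : List Char) (i : Int) : List Char :=
  pvLjust (pvA l1 i) (PySem.List.len (pvBB l2 i))
def pvAlignedB (l1 l2 : List Char) (i : Int) : List Char :=
  pvLjust (pvBB l2 i) (PySem.List.len (pvA l1 i))
def pvScoreAt (l1 l2 : List Char) (i : Int) : Int :=
  pvScoreAlign (pvAlignedA l1 l2 i) (pvAlignedB l1 l2 i)

-- B's per-shift score, written exactly as the fold body of the alt port computes it
def pvBScoreAt (l1 l2 : List Char) (i : Int) : Int :=
  let la := PySem.List.len l1 - max 0 i
  let lb := PySem.List.len l2 - max 0 (-i)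
  let m0 := (pvCnt l1 (pvPos2 l2)).getD i 0
  let m := if la > lb then m0 + PySem.List.pyGetD (pvDashTable l1).2 (la - lb) 0
           else if lb > la then m0 + PySem.List.pyGetD (pvDashTable l2).2 (lb - la) 0
           else m0
  2 * m - max la lb

-- the two fold bodies, named so the invariant can be stated
def pvStepA (l1 l2 : List Char) (st : Option Int × (List Char × List Char)) (i : Int) :
    Option Int × (List Char × List Char) :=
  let s1s := PySem.List.slice l1 (some (max 0 i)) none
  let s2s := PySem.List.slice l2 (some (max 0 (-i))) none
  let aAl := pvLjust s1s (PySem.List.len s2s)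
  let bAl := pvLjust s2s (PySem.List.len s1s)
  let score := pvScoreAlign aAl bAl
  match st.1 with
  | none => (some score, (aAl, bAl))
  | some best => if best < score then (some score, (aAl, bAl)) else st

def pvStepB (l1 l2 : List Char) (best : Option (Int × Int)) (i : Int) : Option (Int × Int) :=
  match best with
  | none => some (pvBScoreAt l1 l2 i, i)
  | some b => if b.1 < pvBScoreAt l1 l2 i then some (pvBScoreAt l1 l2 i, i) else best

def pvCouple (l1 l2 : List Char) (sA : Option Int × (List Char × List Char))
    (sB : Option (Int × Int)) : Prop :=
  match sB with
  | none => sA = (none, ([], []))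
  | some b => (-(l2.length : Int) + 1 ≤ b.2 ∧ b.2 < l1.length) ∧
      sA = (some b.1, (pvAlignedA l1 l2 b.2, pvAlignedB l1 l2 b.2))

-- ---- small generic facts ----

lemma pv_count_flatMap {α : Type} (l : List α) (g : α → List Int) (x : Int) :
    (l.flatMap g).count x = (l.map (fun e => (g e).count x)).sum := by
  induction l with
  | nil => simp
  | cons a t ih => simp [List.count_append, ih]


lemma pv_sum_ite {α : Type} (l : List α) (P : α → Prop) [DecidablePred P] :
    (l.map (fun e => if P e then (1 : Nat) else 0)).sum = l.countP (fun e => decide (P e)) := by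
  induction l with
  | nil => simp
  | cons a t ih =>
    simp only [List.map_cons, List.sum_cons, List.countP_cons, ih]
    by_cases h : P a <;> simp [h] <;> omega


lemma pv_countP_range_sum (n : Nat) (p : Nat → Bool) :
    (List.range n).countP p = ∑ k ∈ Finset.range n, if p k then 1 else 0 := by
  induction n with
  | zero => simp
  | succ n ih =>
    rw [List.range_succ, List.countP_append, ih, Finset.sum_range_succ]
    simp [List.countP_cons]


lemma pv_zipTake (u v : List Char) : u.zip (v.take u.length) = u.zip v := by
  induction u generalizing v with
  | nil => simp
  | cons a t ih => cases v with
    | nil => simp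
    | cons b w => simp [ih]


lemma pv_zipTake' (u v : List Char) : (u.take v.length).zip v = u.zip v := by
  induction u generalizing v with
  | nil => simp
  | cons a t ih => cases v with
    | nil => simp
    | cons b w => simp [ih]


lemma pv_zipRep (u : List Char) :
    ((List.replicate u.length '-').zip u).countP (fun p => p.1 == p.2) = u.count '-' := by
  induction u with
  | nil => simp
  | cons a t ih =>
    by_cases h : a = '-'
    · simp [List.replicate_succ, List.countP_cons, List.count_cons, ih, h]
    · simp [List.replicate_succ, List.countP_cons, List.count_cons, ih, h]
      exact fun hh => h hh.symm


lemma pv_zipRep' (u : List Char) :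
    (u.zip (List.replicate u.length '-')).countP (fun p => p.1 == p.2) = u.count '-' := by
  induction u with
  | nil => simp
  | cons a t ih =>
    by_cases h : a = '-' <;>
      simp [List.replicate_succ, List.countP_cons, List.count_cons, ih, h]


lemma pv_zip_countP_range (u v : List Char) :
    (u.zip v).countP (fun p => p.1 == p.2)
      = (List.range (min u.length v.length)).countP (fun k => u.getD k ' ' == v.getD k ' ') := by
  induction u generalizing v with
  | nil => simp
  | cons a t ih => cases v with
    | nil => simp
    | cons b w =>
      simp only [List.zip_cons_cons, List.countP_cons, List.length_cons,
        Nat.succ_min_succ, List.range_succ_eq_map, List.countP_map]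
      rw [ih]
      have : List.countP ((fun k => (a :: t).getD k ' ' == (b :: w).getD k ' ') ∘ Nat.succ)
          (List.range (min t.length w.length))
          = List.countP (fun k => t.getD k ' ' == w.getD k ' ')
            (List.range (min t.length w.length)) := by
        apply List.countP_congr
        intro k hk
        simp [Function.comp]
      rw [this]
      simp


-- ---- the score loop of A is 2*matches - length ----
lemma pv_foldScore (w : List (Char × Char)) (s : Int) :
    w.foldl (fun score p =>
      if p.1 = p.2 then score + 1
      else if p.1 = '-' ∨ p.2 = '-' then score - 1
      else score - 1) s
    = s + 2 * (w.countP (fun p => p.1 == p.2) : Int) - w.length := by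
  induction w generalizing s with
  | nil => simp
  | cons p t ih =>
    simp only [List.foldl_cons, List.countP_cons, List.length_cons]
    by_cases hp : p.1 = p.2
    · rw [if_pos hp, ih]
      simp [hp]
      push_cast
      ring
    · rw [if_neg hp, ite_self, ih]
      simp [hp]
      push_cast
      ring


-- ---- padding decomposition ----
lemma pv_ljust_eq (s : List Char) (w : Nat) :
    pvLjust s (w : Int) = s ++ List.replicate (w - s.length) '-' := by
  simp [pvLjust]


lemma pv_len_ljust (A B : List Char) :
    (pvLjust A (PySem.List.len B)).length = max A.length B.length := by
  simp [pvLjust, PySem.List.len_eq]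
  omega


lemma pv_cp_pad (A B : List Char) :
    ((pvLjust A (PySem.List.len B)).zip (pvLjust B (PySem.List.len A))).countP (fun p => p.1 == p.2)
      = (A.zip B).countP (fun p => p.1 == p.2)
        + (A.drop B.length).count '-' + (B.drop A.length).count '-' := by
  have hlen : ∀ u : List Char, PySem.List.len u = (u.length : Int) := fun u => PySem.List.len_eq u
  rcases le_total A.length B.length with h | h
  · have hA : pvLjust A (PySem.List.len B) = A ++ List.replicate (B.length - A.length) '-' := by
      rw [hlen, pv_ljust_eq]
    have hB : pvLjust B (PySem.List.len A) = B := by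
      rw [hlen, pv_ljust_eq, Nat.sub_eq_zero_of_le h]
      simp
    rw [hA, hB]
    set m := B.length - A.length with hm
    conv_lhs => rw [show B = B.take A.length ++ B.drop A.length from (List.take_append_drop _ _).symm]
    rw [List.zip_append (by simp [List.length_take]; omega), List.countP_append, pv_zipTake]
    rw [show m = (B.drop A.length).length by simp [hm]]
    rw [pv_zipRep]
    simp [List.drop_eq_nil_of_le h]
  · have hA : pvLjust A (PySem.List.len B) = A := by
      rw [hlen, pv_ljust_eq, Nat.sub_eq_zero_of_le h]
      simp
    have hB : pvLjust B (PySem.List.len A) = B ++ List.replicate (A.length - B.length) '-' := by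
      rw [hlen, pv_ljust_eq]
    rw [hA, hB]
    set m := A.length - B.length with hm
    conv_lhs => rw [show A = A.take B.length ++ A.drop B.length from (List.take_append_drop _ _).symm]
    rw [List.zip_append (by simp [List.length_take]; omega), List.countP_append, pv_zipTake']
    rw [show m = (A.drop B.length).length by simp [hm]]
    rw [pv_zipRep']
    simp [List.drop_eq_nil_of_le h]


-- ---- dash tables ----
lemma pv_dash_scan (u : List Char) (t : Int) (acc : List Int) :
    u.foldl (fun s ch => let v := s.1 + (if ch = '-' then (1 : Int) else 0); (v, s.2 ++ [v]))
      (t, acc)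
    = (t + u.count '-',
       acc ++ (List.range u.length).map (fun j => t + ((u.take (j + 1)).count '-' : Int))) := by
  induction u generalizing t acc with
  | nil => simp
  | cons c v ih =>
    simp only [List.foldl_cons]
    rw [ih]
    refine Prod.ext ?_ ?_
    · simp only [List.count_cons]
      by_cases h : c = '-' <;> simp [h] <;> push_cast <;> try ring
    · have htail : (List.range v.length).map
          ((fun j => t + (((c :: v).take (j + 1)).count '-' : Int)) ∘ Nat.succ)
          = (List.range v.length).map
            (fun j => (t + (if c = '-' then (1 : Int) else 0)) + ((v.take (j + 1)).count '-' : Int)) := by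
        apply List.map_congr_left
        intro j hj
        simp only [Function.comp_apply, List.take_succ_cons, List.count_cons]
        by_cases h : c = '-' <;> simp [h] <;> push_cast <;> ring
      simp only [List.length_cons, List.range_succ_eq_map, List.map_cons, List.map_map]
      rw [htail, List.append_assoc, List.singleton_append]
      by_cases h : c = '-' <;> simp [h, List.take_succ_cons, List.count_cons]

lemma pv_dash_get (l : List Char) (j : Int) (h1 : 1 ≤ j) (h2 : j ≤ l.length) :
    PySem.List.pyGetD (pvDashTable l).2 j 0 = ((l.drop (l.length - j.toNat)).count '-' : Int) := by
  have hscan := pv_dash_scan l.reverse 0 [0]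
  have h2 : (pvDashTable l).2
      = [0] ++ (List.range l.length).map (fun j => ((l.reverse.take (j + 1)).count '-' : Int)) := by
    unfold pvDashTable
    rw [hscan]
    simp
  rw [h2]
  have hlen : ([0] ++ (List.range l.length).map
      (fun j => ((l.reverse.take (j + 1)).count '-' : Int))).length = l.length + 1 := by simp
  rw [PySem.List.pyGetD_eq_getElem _ 0 (by omega) (by rw [hlen]; push_cast; omega)]
  have hj1 : 1 ≤ j.toNat := by omega
  rw [List.getElem_append_right (by simpa using hj1)]
  simp only [List.length_singleton]
  rw [List.getElem_map, List.getElem_range]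
  have hjn : j.toNat - 1 + 1 = j.toNat := by omega
  rw [hjn, List.take_reverse, List.count_reverse]


-- ---- the pair counter ----
lemma pv_pos2_getD (l2 : List Char) (c : Char) :
    (pvPos2 l2).getD c [] = ((PySem.List.enumerate l2 0).filter (fun qc => qc.2 == c)).map (·.1) := by
  have h : pvPos2 l2
      = ((PySem.List.enumerate l2 0).map (fun qc => (qc.2, qc.1))).foldl
          (fun d p => d.modify p.1 [] (· ++ [p.2])) PySem.Dict.empty := by
    unfold pvPos2
    rw [List.foldl_map]
  rw [h, PySem.Dict.getD_foldl_modify_append]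
  simp [List.filter_map, List.map_map, Function.comp_def]


lemma pv_pos_count (l2 : List Char) (c : Char) (x : Int) :
    ((pvPos2 l2).getD c []).count x
      = if 0 ≤ x ∧ x < (l2.length : Int) ∧ l2.getD x.toNat ' ' = c then 1 else 0 := by
  rw [pv_pos2_getD]
  have hpw : (((PySem.List.enumerate l2 0).filter (fun qc => qc.2 == c)).map (fun x => x.1)).Nodup := by
    have h1 := PySem.List.pairwise_lt_enumerate l2 0
    have h2 : List.Pairwise (fun p q : Int × Char => p.1 < q.1)
        ((PySem.List.enumerate l2 0).filter (fun qc => qc.2 == c)) :=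
      List.Pairwise.sublist List.filter_sublist h1
    exact (List.pairwise_map.mpr h2).imp (fun h => ne_of_lt h)
  have hmem : x ∈ ((PySem.List.enumerate l2 0).filter (fun qc => qc.2 == c)).map (fun x => x.1)
      ↔ (0 ≤ x ∧ x < (l2.length : Int) ∧ l2.getD x.toNat ' ' = c) := by
    simp only [List.mem_map, List.mem_filter, PySem.List.mem_enumerate_iff]
    constructor
    · rintro ⟨qc, ⟨⟨k, hk, rfl⟩, hqc⟩, rfl⟩
      simp only [beq_iff_eq] at hqc
      refine ⟨by omega, by omega, ?_⟩
      have ht : ((0 : Int) + (k : Int)).toNat = k := by omega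
      rw [ht, List.getD_eq_getElem _ _ hk]
      exact hqc
    · rintro ⟨hx0, hxlt, hgd⟩
      have hk : x.toNat < l2.length := by omega
      rw [List.getD_eq_getElem _ _ hk] at hgd
      refine ⟨(x, l2.getD x.toNat ' '), ⟨⟨x.toNat, hk, ?_⟩,
        by simp [List.getD_eq_getElem?_getD, List.getElem?_eq_getElem hk, hgd]⟩, rfl⟩
      rw [List.getD_eq_getElem _ _ hk]
      simp
      omega
  by_cases hP : 0 ≤ x ∧ x < (l2.length : Int) ∧ l2.getD x.toNat ' ' = c
  · rw [if_pos hP]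
    exact List.count_eq_one_of_mem hpw (hmem.mpr hP)
  · rw [if_neg hP]
    exact List.count_eq_zero_of_not_mem (fun hm => hP (hmem.mp hm))


lemma pv_countP_enumerate {α : Type} (xs : List α) (s : Int) (p : Int × α → Bool) (dflt : α) :
    (PySem.List.enumerate xs s).countP p
      = (List.range xs.length).countP (fun (k : Nat) => p (s + (k : Int), xs.getD k dflt)) := by
  induction xs generalizing s with
  | nil => simp [PySem.List.enumerate_nil]
  | cons x t ih =>
    rw [PySem.List.enumerate_cons, List.countP_cons, ih (s + 1)]
    conv_rhs => rw [List.length_cons, List.range_succ_eq_map, List.countP_cons, List.countP_map]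
    have hc : List.countP ((fun (k : Nat) => p (s + (k : Int), (x :: t).getD k dflt)) ∘ Nat.succ)
        (List.range t.length)
        = List.countP (fun (k : Nat) => p (s + 1 + (k : Int), t.getD k dflt)) (List.range t.length) := by
      apply List.countP_congr
      intro k hk
      have harg : s + ((k : Int) + 1) = s + 1 + (k : Int) := by ring
      simp [Function.comp, List.getD_cons_succ, harg]
    rw [hc]
    simp


lemma pv_window (l1 l2 : List Char) (i : Int)
    (h1 : -(l2.length : Int) + 1 ≤ i) (h2 : i < (l1.length : Int)) :
    (List.range l1.length).countP (fun (p : Nat) => decide (0 ≤ (p : Int) - i ∧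
        (p : Int) - i < (l2.length : Int) ∧ l2.getD ((p : Int) - i).toNat ' ' = l1.getD p ' '))
      = (List.range (min (l1.length - pvOff1 i) (l2.length - pvOff2 i))).countP
          (fun k => l1.getD (pvOff1 i + k) ' ' == l2.getD (pvOff2 i + k) ' ') := by
  have hm1 : ((pvOff1 i : Nat) : Int) = max 0 i := by
    simp [pvOff1, Int.toNat_of_nonneg (le_max_left 0 i)]
  have hm2 : ((pvOff2 i : Nat) : Int) = max 0 (-i) := by
    simp [pvOff2, Int.toNat_of_nonneg (le_max_left 0 (-i))]
  set n1 := l1.length with hn1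
  set n2 := l2.length with hn2
  set m1 := pvOff1 i with hm1d
  set m2 := pvOff2 i with hm2d
  set mn := min (n1 - m1) (n2 - m2) with hmn
  have hb1 : m1 ≤ n1 := by omega
  have hb2 : m2 ≤ n2 := by omega
  have hb3 : (m1 : Int) - i = (m2 : Int) := by omega
  have hb4 : m1 + mn ≤ n1 := by omega
  have hb5 : m2 + mn ≤ n2 := by omega
  set f : Nat → Nat := fun p => if (decide (0 ≤ (p : Int) - i ∧
      (p : Int) - i < (n2 : Int) ∧ l2.getD ((p : Int) - i).toNat ' ' = l1.getD p ' ')) = true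
      then 1 else 0 with hf
  rw [pv_countP_range_sum, pv_countP_range_sum]
  have e1 := Finset.sum_Ico_consecutive f (Nat.zero_le m1) hb1
  have e2 := Finset.sum_Ico_consecutive f (show m1 ≤ m1 + mn by omega) hb4
  have hz1 : ∑ p ∈ Finset.Ico 0 m1, f p = 0 := by
    apply Finset.sum_eq_zero
    intro p hp
    simp only [Finset.mem_Ico] at hp
    have hno : ¬(0 ≤ (p : Int) - i) := by omega
    simp only [hf]
    simp
    intro h
    exact absurd h (by omega)
  have hz2 : ∑ p ∈ Finset.Ico (m1 + mn) n1, f p = 0 := by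
    apply Finset.sum_eq_zero
    intro p hp
    simp only [Finset.mem_Ico] at hp
    have hno : ¬((p : Int) - i < (n2 : Int)) := by omega
    simp only [hf]
    simp
    intro h h'
    exact absurd h' (by omega)
  have hmid : ∑ p ∈ Finset.Ico m1 (m1 + mn), f p
      = ∑ k ∈ Finset.range mn, (if (l1.getD (m1 + k) ' ' == l2.getD (m2 + k) ' ') = true
          then 1 else 0) := by
    rw [Finset.sum_Ico_eq_sum_range, Nat.add_sub_cancel_left]
    apply Finset.sum_congr rfl
    intro k hk
    simp only [Finset.mem_range] at hk
    have hlt : m2 + k < n2 := by omega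
    have hidx : ((m1 + k : Nat) : Int) - i = ((m2 + k : Nat) : Int) := by push_cast; omega
    have h0 : 0 ≤ ((m1 + k : Nat) : Int) - i := by omega
    have hnn : ((m1 + k : Nat) : Int) - i < (n2 : Int) := by omega
    simp only [hf]
    rw [hidx, Int.toNat_natCast]
    have c1 : i ≤ (m1 : Int) + (k : Int) := by push_cast at h0; omega
    have c2 : (m1 : Int) + (k : Int) - i < (n2 : Int) := by push_cast at hnn; omega
    by_cases hc : l2.getD (m2 + k) ' ' = l1.getD (m1 + k) ' '
    · rw [if_pos (by simp only [decide_eq_true_eq]; exact ⟨by omega, by omega, hc⟩),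
        if_pos (beq_iff_eq.mpr hc.symm)]
    · rw [if_neg (by simp only [decide_eq_true_eq]; rintro ⟨-, -, hx⟩; exact hc hx),
        if_neg (fun hh => hc (beq_iff_eq.mp hh).symm)]
  calc ∑ p ∈ Finset.range n1, f p
      = ∑ p ∈ Finset.Ico 0 m1, f p + (∑ p ∈ Finset.Ico m1 (m1 + mn), f p
          + ∑ p ∈ Finset.Ico (m1 + mn) n1, f p) := by
        rw [e2, e1, Finset.range_eq_Ico]
    _ = ∑ k ∈ Finset.range mn, (if (l1.getD (m1 + k) ' ' == l2.getD (m2 + k) ' ') = true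
          then 1 else 0) := by rw [hz1, hz2, hmid]; omega

lemma pv_cnt_getD (l1 l2 : List Char) (i : Int)
    (h1 : -(l2.length : Int) + 1 ≤ i) (h2 : i < (l1.length : Int)) :
    (pvCnt l1 (pvPos2 l2)).getD i 0
      = (((pvA l1 i).zip (pvBB l2 i)).countP (fun p => p.1 == p.2) : Int) := by
  have hfun : (fun (d : PySem.Dict Int Int) (pc : Int × Char) =>
      ((pvPos2 l2).getD pc.2 []).foldl
        (fun d q => d.insert (pc.1 - q) (d.getD (pc.1 - q) 0 + 1)) d)
      = fun d pc => (((pvPos2 l2).getD pc.2 []).map (fun q => pc.1 - q)).foldl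
          (fun d k => d.insert k (d.getD k 0 + 1)) d := by
    funext d pc
    rw [List.foldl_map]
  have hflat : pvCnt l1 (pvPos2 l2)
      = ((PySem.List.enumerate l1 0).flatMap
          (fun pc => ((pvPos2 l2).getD pc.2 []).map (fun q => pc.1 - q))).foldl
          (fun d k => d.insert k (d.getD k 0 + 1)) PySem.Dict.empty := by
    unfold pvCnt
    rw [hfun, List.flatMap_def, List.foldl_flatten, List.foldl_map]
  rw [hflat, PySem.Dict.getD_foldl_insert_add_one]
  rw [pv_count_flatMap]
  have hmapc : (PySem.List.enumerate l1 0).map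
      (fun pc => ((((pvPos2 l2)).getD pc.2 []).map (fun q => pc.1 - q)).count i)
      = (PySem.List.enumerate l1 0).map
        (fun pc => if 0 ≤ pc.1 - i ∧ pc.1 - i < (l2.length : Int)
            ∧ l2.getD (pc.1 - i).toNat ' ' = pc.2 then 1 else 0) := by
    apply List.map_congr_left
    intro pc _
    have hinj : Function.Injective (fun q : Int => pc.1 - q) := by
      intro a b h
      dsimp at h
      omega
    conv_lhs => rw [show (i : Int) = pc.1 - (pc.1 - i) from by ring]
    rw [List.count_map_of_injective _ _ hinj, pv_pos_count]
  rw [hmapc, pv_sum_ite, pv_countP_enumerate l1 0 _ ' ']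
  have hc1 : (List.range l1.length).countP
      (fun (k : Nat) => decide (0 ≤ 0 + (k : Int) - i ∧ 0 + (k : Int) - i < (l2.length : Int)
        ∧ l2.getD ((0 + (k : Int) - i)).toNat ' ' = l1.getD k ' '))
      = (List.range l1.length).countP (fun (p : Nat) => decide (0 ≤ (p : Int) - i ∧
          (p : Int) - i < (l2.length : Int) ∧ l2.getD ((p : Int) - i).toNat ' ' = l1.getD p ' ')) := by
    apply List.countP_congr
    intro k _
    norm_num
  rw [hc1, pv_window l1 l2 i h1 h2]
  rw [pv_zip_countP_range]
  have hlen : min ((pvA l1 i).length) ((pvBB l2 i).length)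
      = min (l1.length - pvOff1 i) (l2.length - pvOff2 i) := by
    simp [pvA, pvBB]
  rw [hlen]
  have hcp : (List.range (min (l1.length - pvOff1 i) (l2.length - pvOff2 i))).countP
      (fun k => (pvA l1 i).getD k ' ' == (pvBB l2 i).getD k ' ')
      = (List.range (min (l1.length - pvOff1 i) (l2.length - pvOff2 i))).countP
        (fun k => l1.getD (pvOff1 i + k) ' ' == l2.getD (pvOff2 i + k) ' ') := by
    apply List.countP_congr
    intro k _
    simp [pvA, pvBB]
  rw [hcp]
  simp


-- ---- per-shift equality of the two scores ----
lemma pv_score_eq (l1 l2 : List Char) (i : Int)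
    (h1 : -(l2.length : Int) + 1 ≤ i) (h2 : i < (l1.length : Int)) :
    pvBScoreAt l1 l2 i = pvScoreAt l1 l2 i := by
  have hm1 : ((pvOff1 i : Nat) : Int) = max 0 i := by
    simp [pvOff1, Int.toNat_of_nonneg (le_max_left 0 i)]
  have hm2 : ((pvOff2 i : Nat) : Int) = max 0 (-i) := by
    simp [pvOff2, Int.toNat_of_nonneg (le_max_left 0 (-i))]
  have hb1 : pvOff1 i ≤ l1.length := by omega
  have hb2 : pvOff2 i ≤ l2.length := by omega
  have hAl : (pvA l1 i).length = l1.length - pvOff1 i := by simp [pvA]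
  have hBl : (pvBB l2 i).length = l2.length - pvOff2 i := by simp [pvBB]
  have hscoreA : pvScoreAt l1 l2 i
      = 2 * ((((pvA l1 i).zip (pvBB l2 i)).countP (fun p => p.1 == p.2)
            + ((pvA l1 i).drop (pvBB l2 i).length).count '-'
            + ((pvBB l2 i).drop (pvA l1 i).length).count '-' : Nat) : Int)
        - ((max (pvA l1 i).length (pvBB l2 i).length : Nat) : Int) := by
    unfold pvScoreAt pvAlignedA pvAlignedB pvScoreAlign
    rw [pv_foldScore, pv_cp_pad, List.length_zip, pv_len_ljust, pv_len_ljust,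
      max_comm (pvBB l2 i).length (pvA l1 i).length, min_self]
    push_cast
    ring
  unfold pvBScoreAt
  dsimp only
  rw [PySem.List.len_eq, PySem.List.len_eq, pv_cnt_getD l1 l2 i h1 h2, hscoreA]
  have hla : (l1.length : Int) - max 0 i = ((l1.length - pvOff1 i : Nat) : Int) := by
    rw [Nat.cast_sub hb1]
    omega
  have hlb : (l2.length : Int) - max 0 (-i) = ((l2.length - pvOff2 i : Nat) : Int) := by
    rw [Nat.cast_sub hb2]
    omega
  rw [hla, hlb, hAl, hBl]
  set a' := l1.length - pvOff1 i with ha'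
  set b' := l2.length - pvOff2 i with hb'
  rcases Nat.lt_trichotomy b' a' with hlt | heq | hgt
  · rw [if_pos (by exact_mod_cast hlt)]
    rw [show ((a' : Int) - (b' : Int)) = ((a' - b' : Nat) : Int) from by
      rw [Nat.cast_sub (le_of_lt hlt)]]
    rw [pv_dash_get l1 _ (by omega) (by omega), Int.toNat_natCast]
    have hdropA : (l1.drop (l1.length - (a' - b'))).count '-'
        = ((pvA l1 i).drop b').count '-' := by
      rw [show l1.length - (a' - b') = pvOff1 i + b' by omega]
      simp [pvA, List.drop_drop]
    have hdropB : ((pvBB l2 i).drop a').count '-' = 0 := by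
      rw [List.drop_eq_nil_of_le (by omega)]
      simp
    rw [hdropA, hdropB]
    push_cast
    ring
  · rw [heq]
    rw [if_neg (by omega), if_neg (by omega)]
    have hdropA : ((pvA l1 i).drop a').count '-' = 0 := by
      rw [List.drop_eq_nil_of_le (by omega)]
      simp
    have hdropB : ((pvBB l2 i).drop a').count '-' = 0 := by
      rw [List.drop_eq_nil_of_le (by omega)]
      simp
    rw [hdropA, hdropB]
    push_cast
    ring
  · rw [if_neg (by simp; exact_mod_cast Nat.le_of_lt hgt), if_pos (by exact_mod_cast hgt)]
    rw [show ((b' : Int) - (a' : Int)) = ((b' - a' : Nat) : Int) from by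
      rw [Nat.cast_sub (le_of_lt hgt)]]
    rw [pv_dash_get l2 _ (by omega) (by omega), Int.toNat_natCast]
    have hdropB : (l2.drop (l2.length - (b' - a'))).count '-'
        = ((pvBB l2 i).drop a').count '-' := by
      rw [show l2.length - (b' - a') = pvOff2 i + a' by omega]
      simp [pvBB, List.drop_drop]
    have hdropA : ((pvA l1 i).drop b').count '-' = 0 := by
      rw [List.drop_eq_nil_of_le (by omega)]
      simp
    rw [hdropA, hdropB]
    push_cast
    ring


-- ---- the selection folds stay coupled ----
lemma pv_fold_couple (l1 l2 : List Char) (rng : List Int)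
    (hr : ∀ i ∈ rng, -(l2.length : Int) + 1 ≤ i ∧ i < (l1.length : Int)) :
    ∀ sA sB, pvCouple l1 l2 sA sB →
      pvCouple l1 l2 (rng.foldl (pvStepA l1 l2) sA) (rng.foldl (pvStepB l1 l2) sB) := by
  induction rng with
  | nil =>
    intro sA sB h
    simpa using h
  | cons i t ih =>
    intro sA sB h
    have hi := hr i (List.mem_cons_self)
    have hsA : PySem.List.slice l1 (some (max 0 i)) none = pvA l1 i :=
      PySem.List.slice_from l1 (le_max_left 0 i)
    have hsB : PySem.List.slice l2 (some (max 0 (-i))) none = pvBB l2 i :=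
      PySem.List.slice_from l2 (le_max_left 0 (-i))
    simp only [List.foldl_cons]
    apply ih (fun j hj => hr j (List.mem_cons_of_mem _ hj))
    cases sB with
    | none =>
      have hse : sA = (none, ([], [])) := h
      subst hse
      unfold pvCouple pvStepA pvStepB
      dsimp only
      rw [hsA, hsB, pv_score_eq l1 l2 i hi.1 hi.2]
      exact ⟨hi, rfl⟩
    | some b =>
      obtain ⟨hbb, hse⟩ := h
      subst hse
      unfold pvCouple pvStepA pvStepB
      dsimp only
      rw [hsA, hsB, pv_score_eq l1 l2 i hi.1 hi.2]
      rw [show pvScoreAlign (pvLjust (pvA l1 i) (PySem.List.len (pvBB l2 i)))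
            (pvLjust (pvBB l2 i) (PySem.List.len (pvA l1 i))) = pvScoreAt l1 l2 i from rfl]
      by_cases hcond : b.1 < pvScoreAt l1 l2 i
      · rw [if_pos hcond, if_pos hcond]
        exact ⟨hi, rfl⟩
      · rw [if_neg hcond, if_neg hcond]
        exact ⟨hbb, rfl⟩



def pvBuild (l1 l2 : List Char) (i : Int) : List String :=
  let a := PySem.List.slice l1 (some (max 0 i)) none
  let bb := PySem.List.slice l2 (some (max 0 (-i))) none
  let L := max (PySem.List.len a) (PySem.List.len bb)
  [String.ofList (a ++ List.replicate (L - PySem.List.len a).toNat '-'),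
   String.ofList (bb ++ List.replicate (L - PySem.List.len bb).toNat '-')]

lemma pv_portA_eq (seq1 seq2 : String) :
    brute_force_alignment seq1 seq2
      = [String.ofList ((PySem.List.pyRange (-(PySem.List.len seq2.toList) + 1)
            (PySem.List.len seq1.toList) 1).foldl
            (pvStepA seq1.toList seq2.toList) (none, ([], []))).2.1,
         String.ofList ((PySem.List.pyRange (-(PySem.List.len seq2.toList) + 1)
            (PySem.List.len seq1.toList) 1).foldl
            (pvStepA seq1.toList seq2.toList) (none, ([], []))).2.2] := rfl

lemma pv_portB_eq (seq1 seq2 : String) :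
    brute_force_alignment_alt seq1 seq2
      = (match (PySem.List.pyRange (-(PySem.List.len seq2.toList) + 1)
            (PySem.List.len seq1.toList) 1).foldl (pvStepB seq1.toList seq2.toList) none with
        | none => [String.ofList [], String.ofList []]
        | some b => pvBuild seq1.toList seq2.toList b.2) := rfl

lemma pv_build_eq (l1 l2 : List Char) (i : Int) :
    pvBuild l1 l2 i = [String.ofList (pvAlignedA l1 l2 i), String.ofList (pvAlignedB l1 l2 i)] := by
  have hsA : PySem.List.slice l1 (some (max 0 i)) none = pvA l1 i :=
    PySem.List.slice_from l1 (le_max_left 0 i)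
  have hsB : PySem.List.slice l2 (some (max 0 (-i))) none = pvBB l2 i :=
    PySem.List.slice_from l2 (le_max_left 0 (-i))
  unfold pvBuild pvAlignedA pvAlignedB pvLjust
  dsimp only
  rw [hsA, hsB]
  rw [PySem.List.len_eq, PySem.List.len_eq]
  have h1 : ((max ((pvA l1 i).length : Int) ((pvBB l2 i).length : Int)
      - ((pvA l1 i).length : Int))).toNat = ((pvBB l2 i).length : Int).toNat - (pvA l1 i).length := by
    omega
  have h2 : ((max ((pvA l1 i).length : Int) ((pvBB l2 i).length : Int)
      - ((pvBB l2 i).length : Int))).toNat = ((pvA l1 i).length : Int).toNat - (pvBB l2 i).length := by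
    omega
  rw [h1, h2]

-- ===== VERDICT (by name: the statement is the Claim_ definition above) =====
theorem brute_force_alignment_spec : Claim_equal_brute_force_alignment := by
  intro seq1 seq2 _
  unfold Spec_brute_force_alignment
  rw [pv_portA_eq, pv_portB_eq]
  have hr : ∀ i ∈ PySem.List.pyRange (-(PySem.List.len seq2.toList) + 1)
      (PySem.List.len seq1.toList) 1,
      -(seq2.toList.length : Int) + 1 ≤ i ∧ i < (seq1.toList.length : Int) := by
    intro i hi
    rw [PySem.List.mem_pyRange_one] at hi
    rw [PySem.List.len_eq, PySem.List.len_eq] at hi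
    exact ⟨hi.1, hi.2⟩
  have hc := pv_fold_couple seq1.toList seq2.toList _ hr (none, ([], [])) none rfl
  rcases hfold : (PySem.List.pyRange (-(PySem.List.len seq2.toList) + 1)
      (PySem.List.len seq1.toList) 1).foldl (pvStepB seq1.toList seq2.toList) none with _ | b
  · rw [hfold] at hc
    have hA : ((PySem.List.pyRange (-(PySem.List.len seq2.toList) + 1)
        (PySem.List.len seq1.toList) 1).foldl (pvStepA seq1.toList seq2.toList)
        (none, ([], []))) = (none, ([], [])) := hc
    rw [hA]
  · rw [hfold] at hc
    obtain ⟨hbb, hA⟩ := hc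
    rw [hA]
    exact (pv_build_eq seq1.toList seq2.toList b.2).symm
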